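-- pv_equiv track=rewrite | github.com/mike-box/coursera | Build a computer/nand2tetris/nand2tetris/projects/11/JackTokenizer.py | validNum
-- ===== SOURCE A (Python) =====
-- def validNum(val):
--     if len(val) == 0:
--         return False
--     if val[0] == '0' and len(val) > 1:
--         return False
--     for c in val:
--         if ord(c) < ord('0') or ord(c) > ord('9'):
--             return False
--     return True
-- ===== SOURCE B (Python) =====
-- import re
--
-- _CANON_DECIMAL = re.compile(r'[1-9][0-9]*|0')
--
-- def validNum(val):
--     return _CANON_DECIMAL.fullmatch(val) is not None
-- ===== Notes on version B (the rewrite author's own statement) =====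
-- stated objective: idiomatic
-- what changed: Replaced the manual length/leading-zero guards and per-character ord loop with a single compiled regular-expression fullmatch against the canonical-decimal grammar [1-9][0-9]*|0.
import Mathlib
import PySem

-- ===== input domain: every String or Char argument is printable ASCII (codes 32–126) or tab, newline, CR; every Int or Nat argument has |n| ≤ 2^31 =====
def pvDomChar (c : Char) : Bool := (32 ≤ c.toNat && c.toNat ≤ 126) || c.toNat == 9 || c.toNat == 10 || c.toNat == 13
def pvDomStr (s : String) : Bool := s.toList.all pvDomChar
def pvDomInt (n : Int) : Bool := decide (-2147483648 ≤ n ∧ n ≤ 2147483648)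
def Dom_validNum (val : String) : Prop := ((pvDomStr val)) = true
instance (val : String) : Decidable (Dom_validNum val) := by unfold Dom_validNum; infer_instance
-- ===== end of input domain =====

-- B is more idiomatic: a single regex-style grammar match ([1-9][0-9]*|0) instead of manual guards and an ord loop.

-- ===== PORT A =====
-- the `for c in val` loop: return False on the first non-digit, True if the loop finishes
def validNumLoop : List Char → Bool
  | [] => true
  | c :: cs => if c.toNat < 48 || c.toNat > 57 then false else validNumLoop cs

def validNum (val : String) : Bool :=
  match val.toList with
  | [] => false                                   -- len(val) == 0
  | c :: cs =>
      if c == '0' && cs.length + 1 > 1 then false -- val[0]=='0' and len(val)>1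
      else validNumLoop (c :: cs)

-- ===== PORT B =====
-- transliteration of the regex fullmatch r'[1-9][0-9]*|0': empty string fails,
-- otherwise either the single-zero alternative or [1-9] followed by [0-9]*
def validNum_alt (val : String) : Bool :=
  match val.toList with
  | [] => false
  | c :: cs =>
      (c == '0' && cs.isEmpty)
      || (('1' ≤ c && c ≤ '9') && cs.all (fun d => '0' ≤ d && d ≤ '9'))

-- ===== PRECONDITION & SPEC =====
def Spec_validNum (val : String) (out : Bool) : Prop := out = validNum_alt val
instance (val : String) (out : Bool) : Decidable (Spec_validNum val out) := by unfold Spec_validNum; infer_instance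

-- ===== CLAIM (what is proved, stated in full; the proofs are below) =====
def Claim_equal_validNum : Prop := ∀ (val : String), Dom_validNum val → Spec_validNum val (validNum val)

-- ===== LEMMAS AND PROOFS =====
-- c ≠ '0' transferred to the code point
theorem char_ne_toNat {c : Char} (hc : c ≠ '0') : c.toNat ≠ 48 :=
  fun he => hc (Char.ext (UInt32.toNat_inj.mp he))

-- A's scan loop accepts exactly the all-digit lists
theorem validNumLoop_eq_all (l : List Char) :
    validNumLoop l = l.all (fun d => decide ('0' ≤ d) && decide (d ≤ '9')) := by
  induction l with
  | nil => rfl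
  | cons c cs ih =>
      by_cases h1 : 48 ≤ c.toNat
      · by_cases h2 : c.toNat ≤ 57
        · have g1 : '0' ≤ c := h1
          have g2 : c ≤ '9' := h2
          have hg : (c.toNat < 48 || c.toNat > 57) = false := by
            simp only [Bool.or_eq_false_iff, decide_eq_false_iff_not]; omega
          simp [validNumLoop, hg, g1, g2, ih]
        · have g2 : ¬ c ≤ '9' := h2
          have hg : (c.toNat < 48 || c.toNat > 57) = true := by
            simp only [Bool.or_eq_true, decide_eq_true_eq]; omega
          simp [validNumLoop, hg, g2]
      · have g1 : ¬ '0' ≤ c := h1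
        have hg : (c.toNat < 48 || c.toNat > 57) = true := by
          simp only [Bool.or_eq_true, decide_eq_true_eq]; omega
        simp [validNumLoop, hg, g1]

-- ===== VERDICT (by name: the statement is the Claim_ definition above) =====
theorem validNum_spec : Claim_equal_validNum := by
  intro val _
  unfold Spec_validNum validNum validNum_alt
  match hl : val.toList with
  | [] => rfl
  | c :: cs =>
      by_cases hc : c = '0'
      · subst hc
        cases cs with
        | nil => simp [validNumLoop]
        | cons d ds => simp
      · have hne : (c == '0') = false := by simp [hc]
        have hcn : c.toNat ≠ 48 := char_ne_toNat hc
        simp only [hne, Bool.false_and, Bool.false_or, Bool.if_false_left,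
          validNumLoop_eq_all, List.all_cons]
        by_cases h1 : 48 ≤ c.toNat
        · have g0 : '0' ≤ c := h1
          have g1 : '1' ≤ c := show 49 ≤ c.toNat by omega
          simp [g0, g1]
        · have g0 : ¬ '0' ≤ c := h1
          have g1 : ¬ '1' ≤ c := show ¬ 49 ≤ c.toNat by omega
          simp [g0, g1]
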